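-- pv_equiv track=rewrite | github.com/FtmMns/ShirazUnivercity-Msc-courses | term1/DataAnalysis/HW04/Q2.py | list_to_dictionary
-- ===== SOURCE A (Python) =====
-- def list_to_dictionary(list_a: list, min_count: int):
--     dict = {}
--     tuple_a = ()
--     for num in list_a:
--         if num not in tuple_a:
--             tuple_a += (num,)
--
--     for t in tuple_a:
--         count = 0
--         for j in list_a:
--             if t == j and t%2==0:
--                 count += 1
--             if count >= min_count :
--                 dict[t] = count
--
--     return (dict)
-- ===== SOURCE B (Python) =====
-- def list_to_dictionary(list_a: list, min_count: int):
--     counts = {}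
--     for num in list_a:
--         counts[num] = counts.get(num, 0) + 1
--     result = {}
--     for v, n in counts.items():
--         c = n if v % 2 == 0 else 0
--         if c >= min_count:
--             result[v] = c
--     return result
-- ===== Notes on version B (the rewrite author's own statement) =====
-- stated objective: faster
-- what changed: B builds a single-pass frequency dictionary and then emits each distinct value once, instead of A's per-distinct-value rescan of the whole list with repeated dict overwrites.
import Mathlib
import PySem

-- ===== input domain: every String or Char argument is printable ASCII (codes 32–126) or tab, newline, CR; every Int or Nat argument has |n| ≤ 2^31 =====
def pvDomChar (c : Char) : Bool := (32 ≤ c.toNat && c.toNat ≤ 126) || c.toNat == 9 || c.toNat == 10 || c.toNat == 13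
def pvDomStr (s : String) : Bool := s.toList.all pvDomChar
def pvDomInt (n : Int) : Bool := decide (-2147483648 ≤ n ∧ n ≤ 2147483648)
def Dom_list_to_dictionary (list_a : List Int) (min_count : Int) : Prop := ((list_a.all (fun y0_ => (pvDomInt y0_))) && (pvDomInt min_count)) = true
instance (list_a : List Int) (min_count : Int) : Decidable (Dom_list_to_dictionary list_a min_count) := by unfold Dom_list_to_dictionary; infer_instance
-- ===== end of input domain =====

-- B replaces A's per-distinct-value rescan of the whole list by one frequency-counting pass
-- followed by one pass over the distinct values (objective: faster).

-- ===== PORT A =====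
def list_to_dictionary (list_a : List Int) (min_count : Int) : List (Int × Int) :=
  (List.foldl (fun d t =>
      (list_a.foldl (fun (p : Int × PySem.Dict Int Int) j =>
          let count := if t = j ∧ PySem.Int.mod t 2 = 0 then p.1 + 1 else p.1
          (count, if min_count ≤ count then p.2.insert t count else p.2))
        (0, d)).2)
    (PySem.Dict.empty)
    (list_a.foldl (fun tup num => if num ∈ tup then tup else tup ++ [num]) [])).items

-- ===== PORT B =====
def list_to_dictionary_alt (list_a : List Int) (min_count : Int) : List (Int × Int) :=
  (List.foldl (fun r (p : Int × Int) =>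
      let c := if PySem.Int.mod p.1 2 = 0 then p.2 else 0
      if min_count ≤ c then r.insert p.1 c else r)
    (PySem.Dict.empty)
    (list_a.foldl (fun d num => d.insert num (d.getD num 0 + 1)) PySem.Dict.empty).items).items

-- ===== PRECONDITION & SPEC =====
def Spec_list_to_dictionary (list_a : List Int) (min_count : Int) (out : List (Int × Int)) : Prop := out = list_to_dictionary_alt list_a min_count
instance (list_a : List Int) (min_count : Int) (out : List (Int × Int)) : Decidable (Spec_list_to_dictionary list_a min_count out) := by unfold Spec_list_to_dictionary; infer_instance

-- ===== CLAIM (what is proved, stated in full; the proofs are below) =====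
def Claim_equal_list_to_dictionary : Prop := ∀ (list_a : List Int) (min_count : Int), Dom_list_to_dictionary list_a min_count → Spec_list_to_dictionary list_a min_count (list_to_dictionary list_a min_count)

-- ===== LEMMAS AND PROOFS =====

-- the value A's inner loop ends up counting for a candidate t
def pvVal (t : Int) (l : List Int) : Int :=
  if PySem.Int.mod t 2 = 0 then (l.count t : Int) else 0

theorem pvVal_nonneg (t : Int) (l : List Int) : 0 ≤ pvVal t l := by
  unfold pvVal; split <;> simp

theorem pvVal_cons (t x : Int) (l : List Int) :
    pvVal t (x :: l) = (if t = x ∧ PySem.Int.mod t 2 = 0 then 1 else 0) + pvVal t l := by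
  unfold pvVal
  by_cases he : PySem.Int.mod t 2 = 0
  · by_cases hx : t = x
    · subst hx
      rw [if_pos he, if_pos he, if_pos ⟨rfl, he⟩, List.count_cons_self]
      push_cast; ring
    · rw [if_pos he, if_pos he, if_neg (fun h => hx h.1),
          zero_add]
      simp [Ne.symm hx]
  · rw [if_neg he, if_neg he, if_neg (fun h => he h.2), add_zero]

-- A's inner loop over a nonempty list inserts t ↦ pvVal once iff the threshold is met
theorem pvInner_snd (min_count t : Int) (l : List Int) (hl : l ≠ []) :
    ∀ (c : Int) (d : PySem.Dict Int Int),
    (l.foldl (fun (p : Int × PySem.Dict Int Int) j =>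
        let count := if t = j ∧ PySem.Int.mod t 2 = 0 then p.1 + 1 else p.1
        (count, if min_count ≤ count then p.2.insert t count else p.2))
      (c, d)).2 =
    if min_count ≤ c + pvVal t l then d.insert t (c + pvVal t l) else d := by
  induction l with
  | nil => exact absurd rfl hl
  | cons x l ih =>
    intro c d
    simp only [List.foldl_cons]
    set c' : Int := if t = x ∧ PySem.Int.mod t 2 = 0 then c + 1 else c with hc'
    have hcc : c + pvVal t (x :: l) = c' + pvVal t l := by
      rw [pvVal_cons, hc']
      by_cases hx : t = x ∧ PySem.Int.mod t 2 = 0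
      · rw [if_pos hx, if_pos hx]; ring
      · rw [if_neg hx, if_neg hx]; ring
    have hle : c' ≤ c' + pvVal t l := by have := pvVal_nonneg t l; omega
    rcases List.eq_nil_or_concat l with hnil | _
    · subst hnil
      simp only [List.foldl_nil]
      rw [hcc]
      have : pvVal t ([] : List Int) = 0 := by unfold pvVal; split <;> simp
      rw [this, add_zero]
    · have hl' : l ≠ [] := by rintro rfl; simp_all
      rw [ih hl', hcc]
      by_cases h1 : min_count ≤ c'
      · simp only [if_pos h1]
        have h2 : min_count ≤ c' + pvVal t l := le_trans h1 hle
        simp [h2, PySem.Dict.insert_insert_self]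
      · simp only [if_neg h1]

-- A's outer loop over distinct fresh keys, as a filterMap
theorem pvOuter (min_count : Int) (list_a : List Int) (hla : list_a ≠ []) (ts : List Int) :
    ∀ (d : PySem.Dict Int Int), ts.Nodup → (∀ t ∈ ts, d.contains t = false) →
    (ts.foldl (fun d t =>
      (list_a.foldl (fun (p : Int × PySem.Dict Int Int) j =>
          let count := if t = j ∧ PySem.Int.mod t 2 = 0 then p.1 + 1 else p.1
          (count, if min_count ≤ count then p.2.insert t count else p.2))
        (0, d)).2) d).items =
    d.items ++ ts.filterMap (fun t =>
      if min_count ≤ pvVal t list_a then some (t, pvVal t list_a) else none) := by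
  induction ts with
  | nil => intro d _ _; simp
  | cons t ts ih =>
    intro d hnd hfresh
    simp only [List.foldl_cons, List.filterMap_cons]
    rw [pvInner_snd min_count t list_a hla]
    have hdt : d.contains t = false := hfresh t (by simp)
    have h0 : (0 : Int) + pvVal t list_a = pvVal t list_a := by ring
    by_cases h : min_count ≤ pvVal t list_a
    · rw [h0, if_pos h, if_pos h]
      rw [ih (d.insert t (pvVal t list_a)) hnd.of_cons]
      · rw [PySem.Dict.items_insert_of_not_contains _ _ hdt]
        simp
      · intro t' ht'
        have hne : t' ≠ t := by rintro rfl; exact (List.nodup_cons.mp hnd).1 ht'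
        rw [PySem.Dict.contains_insert]
        simp [hne, hfresh t' (by simp [ht'])]
    · rw [h0, if_neg h, if_neg h]
      exact ih d hnd.of_cons (fun t' ht' => hfresh t' (by simp [ht']))

-- B's second loop over distinct fresh keys, as a filterMap
theorem pvAltLoop (min_count : Int) (ps : List (Int × Int)) :
    ∀ (r : PySem.Dict Int Int), (ps.map (·.1)).Nodup → (∀ p ∈ ps, r.contains p.1 = false) →
    (ps.foldl (fun r p =>
      let c := if PySem.Int.mod p.1 2 = 0 then p.2 else 0
      if min_count ≤ c then r.insert p.1 c else r) r).items =
    r.items ++ ps.filterMap (fun p =>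
      let c := if PySem.Int.mod p.1 2 = 0 then p.2 else 0
      if min_count ≤ c then some (p.1, c) else none) := by
  induction ps with
  | nil => intro r _ _; simp
  | cons p ps ih =>
    intro r hnd hfresh
    simp only [List.foldl_cons, List.filterMap_cons, List.map_cons, List.nodup_cons] at *
    set c : Int := if PySem.Int.mod p.1 2 = 0 then p.2 else 0 with hc
    by_cases h : min_count ≤ c
    · simp only [if_pos h]
      rw [ih (r.insert p.1 c) hnd.2]
      · rw [PySem.Dict.items_insert_of_not_contains _ _ (hfresh p (by simp))]
        simp
      · intro p' hp'
        have hne : p'.1 ≠ p.1 := by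
          intro he; exact hnd.1 (he ▸ List.mem_map_of_mem hp')
        rw [PySem.Dict.contains_insert]
        simp [hne, hfresh p' (by simp [hp'])]
    · simp only [if_neg h]
      exact ih r hnd.2 (fun p' hp' => hfresh p' (by simp [hp']))

-- A's manual tuple dedup is set(list_a) in first-occurrence order
theorem pvTuple (list_a : List Int) :
    list_a.foldl (fun tup num => if num ∈ tup then tup else tup ++ [num]) [] =
    PySem.Set.ofList list_a := by
  rw [PySem.Set.ofList_eq_foldl]
  exact (PySem.List.foldl_congr_mem _ _ _ _
    (fun tup num _ => by rw [PySem.Set.add_eq_ite])).symm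

-- ===== VERDICT (by name: the statement is the Claim_ definition above) =====
theorem list_to_dictionary_spec : Claim_equal_list_to_dictionary := by
  intro list_a min_count _
  unfold Spec_list_to_dictionary list_to_dictionary list_to_dictionary_alt
  rcases List.eq_nil_or_concat list_a with rfl | _
  · rfl
  have hla : list_a ≠ [] := by rintro rfl; simp_all
  rw [pvTuple, PySem.Dict.foldl_insert_getD_add_one_eq_counter,
      PySem.Dict.items_counter,
      pvOuter min_count list_a hla (PySem.Set.ofList list_a) PySem.Dict.empty
        (PySem.Set.nodup_ofList list_a) (by simp [PySem.Dict.contains_empty]),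
      pvAltLoop min_count _ PySem.Dict.empty
        (by simp [Function.comp_def])
        (by simp [PySem.Dict.contains_empty])]
  simp only [List.filterMap_map, PySem.Dict.empty, List.nil_append]
  apply List.filterMap_congr
  intro t _
  simp only [Function.comp, pvVal]
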